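-- pv_equiv track=rewrite | github.com/sushain97/apertium-monorepo-svn-82937 | trunk/apertium-tools/scrapers-misc/scrp-kumukia-adabiyat.py | refiner
-- ===== SOURCE A (Python) =====
-- def refiner(p):
--
--         k=[]
--
--         for i in range(len(p)):
--                 if p[i]=="getpage.php" or p[i]== "getmenu.php" or p[i].find("search=worklist")==0 or p[i].find("search=workpage")==0:
--                         k.append(p[i])
--         hp = []
--
--         for i in range(len(k)):
--                 if i%2!=0:
--                         hp.append("http://kumukia.ru/adabiat/%s?%s" %  (k[0], k[i]))
--
--         return hp
-- ===== SOURCE B (Python) =====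
-- def refiner(p):
--     hp = []
--     base = None
--     n = 0
--     for x in p:
--         if x == "getpage.php" or x == "getmenu.php" or x.startswith("search=worklist") or x.startswith("search=workpage"):
--             if n == 0:
--                 base = x
--             elif n % 2 == 1:
--                 hp.append("http://kumukia.ru/adabiat/%s?%s" % (base, x))
--             n += 1
--     return hp
-- ===== Notes on version B (the rewrite author's own statement) =====
-- stated objective: simpler
-- what changed: Single streaming pass over p with a match counter and a stored base, instead of materialising the filtered list k and then re-scanning it by index; startswith replaces find()==0.
import Mathlib
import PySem

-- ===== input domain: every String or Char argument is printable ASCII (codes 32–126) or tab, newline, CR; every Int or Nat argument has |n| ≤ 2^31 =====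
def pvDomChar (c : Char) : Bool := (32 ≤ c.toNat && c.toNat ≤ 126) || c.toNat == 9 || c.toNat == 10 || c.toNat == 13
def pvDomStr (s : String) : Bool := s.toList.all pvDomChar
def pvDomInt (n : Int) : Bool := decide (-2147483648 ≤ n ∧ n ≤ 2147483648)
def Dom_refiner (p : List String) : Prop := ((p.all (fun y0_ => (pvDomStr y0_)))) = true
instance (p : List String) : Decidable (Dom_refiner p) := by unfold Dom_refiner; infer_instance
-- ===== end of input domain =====

-- B replaces A's two passes (collect the matches into k, then rebuild URLs by index)
-- with one streaming pass keeping a match counter and the first match as base (objective: simpler).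

-- ===== PORT A =====
def refiner (p : List String) : List String :=
  let k := (PySem.List.pyRange 0 (p.length : Int) 1).foldl (fun k i =>
    if PySem.List.pyGetD p i "" == "getpage.php" || PySem.List.pyGetD p i "" == "getmenu.php"
        || PySem.Str.find (PySem.List.pyGetD p i "") "search=worklist" == 0
        || PySem.Str.find (PySem.List.pyGetD p i "") "search=workpage" == 0
    then k ++ [PySem.List.pyGetD p i ""] else k) []
  (PySem.List.pyRange 0 (k.length : Int) 1).foldl (fun hp i =>
    if PySem.Int.mod i 2 != 0
    then hp ++ ["http://kumukia.ru/adabiat/" ++ PySem.List.pyGetD k 0 "" ++ "?" ++ PySem.List.pyGetD k i ""]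
    else hp) []

-- ===== PORT B =====
def refiner_alt (p : List String) : List String :=
  (p.foldl (fun (st : List String × Option String × Nat) x =>
    if x == "getpage.php" || x == "getmenu.php"
        || PySem.Str.startswith x "search=worklist" || PySem.Str.startswith x "search=workpage"
    then
      if st.2.2 == 0 then (st.1, some x, st.2.2 + 1)
      else if st.2.2 % 2 == 1 then
        (st.1 ++ ["http://kumukia.ru/adabiat/" ++ st.2.1.getD "" ++ "?" ++ x], st.2.1, st.2.2 + 1)
      else (st.1, st.2.1, st.2.2 + 1)
    else st) ([], none, 0)).1

-- ===== PRECONDITION & SPEC =====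
def Spec_refiner (p : List String) (out : List String) : Prop := out = refiner_alt p
instance (p : List String) (out : List String) : Decidable (Spec_refiner p out) := by unfold Spec_refiner; infer_instance

-- ===== CLAIM (what is proved, stated in full; the proofs are below) =====
def Claim_equal_refiner : Prop := ∀ (p : List String), Dom_refiner p → Spec_refiner p (refiner p)

-- ===== LEMMAS AND PROOFS =====

-- every other element, keeping the head iff b
def pvSel {α : Type} (b : Bool) : List α → List α
  | [] => []
  | x :: xs => if b then x :: pvSel (!b) xs else pvSel (!b) xs

def pvCond (x : String) : Bool :=
  x == "getpage.php" || x == "getmenu.php"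
    || PySem.Str.startswith x "search=worklist" || PySem.Str.startswith x "search=workpage"

def pvUrl (b x : String) : String := "http://kumukia.ru/adabiat/" ++ b ++ "?" ++ x

-- s.find(sub) == 0 is exactly s.startswith(sub)
theorem pv_find_zero_eq_startswith (s sub : String) :
    (PySem.Str.find s sub == 0) = PySem.Str.startswith s sub := by
  simp only [PySem.Str.find_eq, PySem.Str.startswith_eq]
  apply Bool.eq_iff_iff.mpr
  rw [beq_iff_eq, PySem.Chars.startswith_iff]
  constructor
  · intro h
    have h0 : (0 : Int) ≤ PySem.Chars.find s.toList sub.toList := by rw [h]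
    have := (PySem.Chars.find_spec (s := s.toList) (sub := sub.toList) h0).1
    simpa [h] using this
  · intro h
    have hnn : (0 : Int) ≤ PySem.Chars.find s.toList sub.toList :=
      (PySem.Chars.find_nonneg_iff _ _).mpr (h.isInfix)
    by_contra hne
    have hpos : 0 < (PySem.Chars.find s.toList sub.toList).toNat := by omega
    have := (PySem.Chars.find_spec (s := s.toList) (sub := sub.toList) hnn).2 0 hpos
    simp at this
    exact this h

theorem pv_sel_append_singleton {α : Type} (b : Bool) (xs : List α) (x : α) :
    pvSel b (xs ++ [x]) = pvSel b xs ++ (if (decide (xs.length % 2 = 0)) == b then [x] else []) := by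
  induction xs generalizing b with
  | nil => cases b <;> simp [pvSel]
  | cons y ys ih =>
      cases b <;>
        simp only [pvSel, List.cons_append, ih, List.length_cons, Bool.not_false, Bool.not_true] <;>
        rcases Nat.mod_two_eq_zero_or_one ys.length with h | h <;>
        simp [h, Nat.succ_mod_two_eq_zero_iff]

-- A's second loop body: the odd-index elements of k, as pvSel false k
theorem pv_odd_index_map (k : List String) (f : String → String) :
    (((PySem.List.pyRange 0 (k.length : Int) 1).filter (fun i => PySem.Int.mod i 2 != 0)).map
      (fun i => f (PySem.List.pyGetD k i ""))) = (pvSel false k).map f := by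
  induction k using List.reverseRecOn with
  | nil => simp [pvSel, PySem.List.pyRange_one_eq_nil]
  | append_singleton k x ih =>
      have hlen : ((k ++ [x]).length : Int) = (k.length : Int) + 1 := by
        simp
      rw [hlen, PySem.List.pyRange_one_succ_right (Int.natCast_nonneg _)]
      rw [List.filter_append, List.map_append]
      have hleft :
          ((PySem.List.pyRange 0 (k.length : Int) 1).filter (fun i => PySem.Int.mod i 2 != 0)).map
            (fun i => f (PySem.List.pyGetD (k ++ [x]) i "")) =
          ((PySem.List.pyRange 0 (k.length : Int) 1).filter (fun i => PySem.Int.mod i 2 != 0)).map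
            (fun i => f (PySem.List.pyGetD k i "")) := by
        apply List.map_congr_left
        intro i hi
        have hi' := (PySem.List.mem_pyRange_one).mp (List.mem_of_mem_filter hi)
        have h1 : PySem.List.pyGetD (k ++ [x]) i "" = k[i.toNat]'(by omega) := by
          rw [PySem.List.pyGetD_eq_getElem (k ++ [x]) "" hi'.1
            (by simp only [List.length_append, List.length_cons, List.length_nil]; push_cast; omega)]
          exact List.getElem_append_left (by omega)
        have h2 : PySem.List.pyGetD k i "" = k[i.toNat]'(by omega) :=
          PySem.List.pyGetD_eq_getElem k "" hi'.1 (by omega)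
        rw [h1, h2]
      rw [hleft, ih, pv_sel_append_singleton, List.map_append]
      congr 1
      have hget : PySem.List.pyGetD (k ++ [x]) (k.length : Int) "" = x := by
        rw [PySem.List.pyGetD_eq_getElem (k ++ [x]) "" (Int.natCast_nonneg _)
          (by simp only [List.length_append, List.length_cons, List.length_nil]; push_cast; omega)]
        simp
      rcases Nat.mod_two_eq_zero_or_one k.length with h | h
      · have h2 : PySem.Int.mod (k.length : Int) 2 = 0 := by
          have := PySem.Int.mod_natCast k.length 2
          simpa [h] using this
        rw [List.filter_cons, if_neg (by rw [h2]; simp)]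
        simp [h]
      · have h2 : PySem.Int.mod (k.length : Int) 2 = 1 := by
          have := PySem.Int.mod_natCast k.length 2
          simpa [h] using this
        rw [List.filter_cons, if_pos (by rw [h2]; rfl)]
        simp [h, hget]

-- fold whose step is the identity off pvCond = fold over the filtered list
theorem pv_foldl_filter {β : Type} (g : β → String → β) (l : List String) (st : β) :
    l.foldl (fun st x => if pvCond x then g st x else st) st =
      (l.filter pvCond).foldl g st := by
  induction l generalizing st with
  | nil => rfl
  | cons y ys ih => by_cases h : pvCond y <;> simp [h, ih]

def pvStep (st : List String × Option String × Nat) (x : String) : List String × Option String × Nat :=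
  if st.2.2 == 0 then (st.1, some x, st.2.2 + 1)
  else if st.2.2 % 2 == 1 then (st.1 ++ [pvUrl (st.2.1.getD "") x], st.2.1, st.2.2 + 1)
  else (st.1, st.2.1, st.2.2 + 1)

-- B's machine run from a started state
theorem pv_machine_run (rest : List String) (hp : List String) (b : String) (n : Nat) (hn : n ≠ 0) :
    (rest.foldl pvStep (hp, some b, n)).1 =
      hp ++ (pvSel (decide (n % 2 = 1)) rest).map (pvUrl b) := by
  induction rest generalizing hp n with
  | nil => simp [pvSel]
  | cons x xs ih =>
      have hflip : (decide ((n + 1) % 2 = 1)) = !(decide (n % 2 = 1)) := by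
        rcases Nat.mod_two_eq_zero_or_one n with h | h <;>
          simp [Nat.succ_mod_two_eq_one_iff, h]
      rcases Nat.mod_two_eq_zero_or_one n with h | h
      · have hs : pvStep (hp, some b, n) x = (hp, some b, n + 1) := by
          simp [pvStep, hn, h]
        rw [List.foldl_cons, hs, ih _ (n + 1) (by omega), hflip]
        simp [pvSel, h]
      · have hs : pvStep (hp, some b, n) x = (hp ++ [pvUrl b x], some b, n + 1) := by
          simp [pvStep, hn, h]
        rw [List.foldl_cons, hs, ih _ (n + 1) (by omega), hflip]
        simp [pvSel, h]

-- ===== VERDICT (by name: the statement is the Claim_ definition above) =====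
theorem refiner_spec : Claim_equal_refiner := by
  intro p _
  unfold Spec_refiner refiner refiner_alt
  -- A's first loop is the filter of p by pvCond
  rw [PySem.List.foldl_pyRange_zero_pyGetD' p "" (fun k x =>
        if x == "getpage.php" || x == "getmenu.php"
            || PySem.Str.find x "search=worklist" == 0
            || PySem.Str.find x "search=workpage" == 0 then k ++ [x] else k) []]
  simp only [pv_find_zero_eq_startswith]
  rw [PySem.List.foldl_append_if_eq_filter]
  have hcond : (fun (x : String) => x == "getpage.php" || x == "getmenu.php"
      || PySem.Str.startswith x "search=worklist" || PySem.Str.startswith x "search=workpage")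
      = pvCond := rfl
  rw [hcond]
  -- B's fold skips non-matching elements
  have hB : (p.foldl (fun (st : List String × Option String × Nat) x =>
      if x == "getpage.php" || x == "getmenu.php"
          || PySem.Str.startswith x "search=worklist" || PySem.Str.startswith x "search=workpage"
      then
        if st.2.2 == 0 then (st.1, some x, st.2.2 + 1)
        else if st.2.2 % 2 == 1 then
          (st.1 ++ ["http://kumukia.ru/adabiat/" ++ st.2.1.getD "" ++ "?" ++ x], st.2.1, st.2.2 + 1)
        else (st.1, st.2.1, st.2.2 + 1)
      else st) ([], none, 0)) = ((p.filter pvCond).foldl pvStep ([], none, 0)) := by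
    rw [show (fun (st : List String × Option String × Nat) x =>
      if x == "getpage.php" || x == "getmenu.php"
          || PySem.Str.startswith x "search=worklist" || PySem.Str.startswith x "search=workpage"
      then
        if st.2.2 == 0 then (st.1, some x, st.2.2 + 1)
        else if st.2.2 % 2 == 1 then
          (st.1 ++ ["http://kumukia.ru/adabiat/" ++ st.2.1.getD "" ++ "?" ++ x], st.2.1, st.2.2 + 1)
        else (st.1, st.2.1, st.2.2 + 1)
      else st) = (fun st x => if pvCond x then pvStep st x else st) from by
        funext st x; simp [pvCond, pvStep, pvUrl]]
    exact pv_foldl_filter pvStep p ([], none, 0)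
  rw [hB]
  simp only [List.nil_append]
  -- both sides over ms := p.filter pvCond
  cases hms : List.filter pvCond p with
  | nil =>
      simp [PySem.List.pyRange_one_eq_nil]
  | cons m0 rest =>
      have hstep0 : pvStep ([], none, 0) m0 = ([], some m0, 1) := by simp [pvStep]
      rw [List.foldl_cons, hstep0, pv_machine_run rest [] m0 1 (by omega)]
      rw [PySem.List.foldl_append_if (fun i => PySem.Int.mod i 2 != 0)
        (fun i => "http://kumukia.ru/adabiat/" ++ PySem.List.pyGetD (m0 :: rest) 0 ""
            ++ "?" ++ PySem.List.pyGetD (m0 :: rest) i "")]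
      have h0 : PySem.List.pyGetD (m0 :: rest) 0 "" = m0 := PySem.List.pyGetD_zero_cons m0 rest ""
      have hmap := pv_odd_index_map (m0 :: rest) (fun x => pvUrl m0 x)
      simp only [pvUrl] at hmap
      simp only [h0]
      rw [hmap]
      simp [pvSel, pvUrl]
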